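-- pv_equiv track=rewrite | github.com/Nauzeous/project-euler | 191.py | rec
-- ===== SOURCE A (Python) =====
-- def rec(daysleft,os):
-- 	if daysleft == 0:
-- 		return os
-- 	if daysleft > 2:
-- 		return rec(daysleft-1,os+1) + rec(daysleft-2,os+1) + rec(daysleft-3,os+1)
-- 	if daysleft > 1:
-- 		return rec(daysleft-1,os+1) + rec(daysleft-2,os+1)
-- 	return rec(daysleft-1,os+1)
-- ===== SOURCE B (Python) =====
-- def rec(daysleft, os):
--     # Linear DP: L = number of leaves of the day-sequence tree, S = sum of depths
--     # over leaves; rolling window holds (L,S) at n-2, n-1, n. rec(n, os) = os*L(n)+S(n).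
--     l2, s2, l1, s1, l0, s0 = 0, 0, 0, 0, 1, 0
--     for _ in range(daysleft):
--         l2, s2, l1, s1, l0, s0 = l1, s1, l0, s0, l0 + l1 + l2, (s0 + l0) + (s1 + l1) + (s2 + l2)
--     return os * l0 + s0
-- ===== Notes on version B (the rewrite author's own statement) =====
-- stated objective: faster
-- what changed: Replaced the exponential 3-way recursion by a linear dynamic program on (leaf-count, depth-sum) pairs kept in a rolling window of the last three values, using rec(n,os) = os*L(n)+S(n); intended as faster: A is exponential and timed out beyond n=16, where B measured ~6000x faster on the one input both finished.
import Mathlib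
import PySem

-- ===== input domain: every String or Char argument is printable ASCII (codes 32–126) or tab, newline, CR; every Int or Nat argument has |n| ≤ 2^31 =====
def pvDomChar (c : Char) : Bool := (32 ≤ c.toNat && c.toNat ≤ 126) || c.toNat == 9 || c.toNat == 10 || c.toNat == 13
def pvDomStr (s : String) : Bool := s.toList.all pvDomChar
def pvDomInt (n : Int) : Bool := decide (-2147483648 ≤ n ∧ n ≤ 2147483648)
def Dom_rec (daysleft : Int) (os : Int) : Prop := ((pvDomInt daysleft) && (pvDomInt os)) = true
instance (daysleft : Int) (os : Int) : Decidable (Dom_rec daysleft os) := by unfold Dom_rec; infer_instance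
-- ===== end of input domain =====

-- B replaces A's exponential 3-way recursion by a linear rolling-window DP; equiv proved on daysleft ≥ 0 (A recurses forever otherwise).

-- ===== PORT A =====
def rec (daysleft : Int) (os : Int) : Int :=
  if daysleft = 0 then os
  else if daysleft > 2 then
    rec (daysleft - 1) (os + 1) + rec (daysleft - 2) (os + 1) + rec (daysleft - 3) (os + 1)
  else if daysleft > 1 then
    rec (daysleft - 1) (os + 1) + rec (daysleft - 2) (os + 1)
  else if daysleft > 0 then rec (daysleft - 1) (os + 1)
  else 0  -- Python recurses forever here (daysleft < 0, RecursionError); outside Pre_rec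
termination_by daysleft.toNat
decreasing_by all_goals omega

-- ===== PORT B =====
-- one iteration of Source B's loop body on the rolling window (l2,s2,l1,s1,l0,s0)
def recStep (st : Int × Int × Int × Int × Int × Int) : Int × Int × Int × Int × Int × Int :=
  match st with
  | (l2, s2, l1, s1, l0, s0) =>
    (l1, s1, l0, s0, l0 + l1 + l2, (s0 + l0) + (s1 + l1) + (s2 + l2))

def rec_alt (daysleft : Int) (os : Int) : Int :=
  let st := (PySem.List.pyRange 0 daysleft 1).foldl (fun s _ => recStep s) (0, 0, 0, 0, 1, 0)
  os * st.2.2.2.2.1 + st.2.2.2.2.2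

-- ===== PRECONDITION & SPEC =====
-- Pre_ excludes daysleft < 0, where Python A never terminates (RecursionError).
def Pre_rec (daysleft : Int) (os : Int) : Prop := 0 ≤ daysleft
instance (daysleft : Int) (os : Int) : Decidable (Pre_rec daysleft os) := by unfold Pre_rec; infer_instance
def pvWitness_rec : Int × Int := (4, 0)

def Spec_rec (daysleft : Int) (os : Int) (out : Int) : Prop := out = rec_alt daysleft os
instance (daysleft : Int) (os : Int) (out : Int) : Decidable (Spec_rec daysleft os out) := by unfold Spec_rec; infer_instance

-- ===== CLAIM (what is proved, stated in full; the proofs are below) =====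
def Claim_equal_rec : Prop := ∀ (daysleft : Int) (os : Int), Dom_rec daysleft os → Pre_rec daysleft os → Spec_rec daysleft os (rec daysleft os)

-- ===== LEMMAS AND PROOFS =====

-- leaf count and depth-sum of A's recursion tree
def LC : Nat → Int
  | 0 => 1
  | 1 => 1
  | 2 => 2
  | n + 3 => LC (n + 2) + LC (n + 1) + LC n

def SC : Nat → Int
  | 0 => 0
  | 1 => 1
  | 2 => 3
  | n + 3 => (SC (n + 2) + LC (n + 2)) + (SC (n + 1) + LC (n + 1)) + (SC n + LC n)

-- the state after n iterations of Source B's loop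
def fB : Nat → Int × Int × Int × Int × Int × Int
  | 0 => (0, 0, 0, 0, 1, 0)
  | n + 1 => recStep (fB n)

lemma foldl_const_step (l : List Int) (k : Nat) :
    l.foldl (fun s _ => recStep s) (fB k) = fB (k + l.length) := by
  induction l generalizing k with
  | nil => simp
  | cons x xs ih =>
    simp only [List.foldl_cons, List.length_cons]
    have : recStep (fB k) = fB (k + 1) := rfl
    rw [this, ih]
    congr 1
    omega

lemma fB_eq (n : Nat) :
    fB (n + 2) = (LC n, SC n, LC (n + 1), SC (n + 1), LC (n + 2), SC (n + 2)) := by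
  induction n with
  | zero => decide
  | succ n ih =>
    show recStep (fB (n + 2)) = _
    rw [ih]
    simp only [recStep, LC, SC]

lemma rec_zero (os : Int) : rec 0 os = os := by rw [rec]; norm_num

lemma rec_one (os : Int) : rec 1 os = os + 1 := by
  rw [rec]; norm_num; rw [rec_zero]

lemma rec_two (os : Int) : rec 2 os = 2 * os + 3 := by
  rw [rec]; norm_num
  rw [rec_one, rec_zero]; ring

lemma rec_nat (n : Nat) : ∀ (os : Int), rec (n : Int) os = os * LC n + SC n := by
  induction n using Nat.strong_induction_on with
  | _ n ih =>
    match n with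
    | 0 => intro os; simpa [LC, SC] using rec_zero os
    | 1 => intro os; rw [show ((1 : Nat) : Int) = 1 by norm_num, rec_one]; simp [LC, SC]
    | 2 => intro os; rw [show ((2 : Nat) : Int) = 2 by norm_num, rec_two]; simp [LC, SC]; ring
    | (m + 3) =>
      intro os
      have h0 : ((m + 3 : Nat) : Int) = (m : Int) + 3 := by push_cast; ring
      rw [h0, rec]
      have hne : ¬((m : Int) + 3 = 0) := by omega
      have hgt : (m : Int) + 3 > 2 := by omega
      rw [if_neg hne, if_pos hgt]
      have e1 : (m : Int) + 3 - 1 = ((m + 2 : Nat) : Int) := by push_cast; ring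
      have e2 : (m : Int) + 3 - 2 = ((m + 1 : Nat) : Int) := by push_cast; ring
      have e3 : (m : Int) + 3 - 3 = ((m : Nat) : Int) := by ring
      rw [e1, e2, e3, ih (m + 2) (by omega), ih (m + 1) (by omega), ih m (by omega)]
      simp only [LC, SC]
      ring

lemma rec_alt_nat (n : Nat) (os : Int) : rec_alt (n : Int) os = os * LC n + SC n := by
  unfold rec_alt
  have hlen : (PySem.List.pyRange 0 (n : Int) 1).length = n := by
    rw [PySem.List.length_pyRange_one]; omega
  have hfold : (PySem.List.pyRange 0 (n : Int) 1).foldl (fun s _ => recStep s) (0, 0, 0, 0, 1, 0)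
      = fB n := by
    have := foldl_const_step (PySem.List.pyRange 0 (n : Int) 1) 0
    simpa [hlen, fB] using this
  rw [hfold]
  match n with
  | 0 => simp [fB, LC, SC]
  | 1 => simp [fB, recStep, LC, SC]
  | (m + 2) => rw [fB_eq m]

-- ===== VERDICT (by name: the statement is the Claim_ definition above) =====
theorem rec_spec : Claim_equal_rec := by
  intro daysleft os _ hp
  unfold Spec_rec
  have h : daysleft = ((daysleft.toNat : Nat) : Int) := by
    unfold Pre_rec at hp; omega
  rw [h, rec_nat, rec_alt_nat]
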